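-- pv_equiv track=rewrite | github.com/nrastinger/vocabulary-comparison | Functions/vc.py | vocab_matrix
-- ===== SOURCE A (Python) =====
-- def vocab_compare(vocab1, vocab2):
--     zähler = 0
--     for tag1 in vocab1.keys():
--         for tag2 in vocab2.keys():
--             if tag1 == tag2:
--                 zähler = zähler + 1
--     return zähler
--
-- def vocab_matrix(vocabs):
--     vocabs_dict = {}
--     for vocab in vocabs:
--         vocabs_dict[vocab[1]] = vocab[0]
--     matrix = {}
--     for entry in vocabs_dict.keys():
--         for other in vocabs_dict.keys():
--             titel = entry + "_" + other #e.g. acdh_dc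
--             count = vocab_compare(vocabs_dict[entry], vocabs_dict[other])
--             matrix[titel] = count
--     return matrix
-- ===== SOURCE B (Python) =====
-- def vocab_matrix(vocabs):
--     vocabs_dict = {}
--     for vocab in vocabs:
--         vocabs_dict[vocab[1]] = vocab[0]
--     names = list(vocabs_dict.keys())
--     # inverted index: key -> list of vocab names containing it
--     index = {}
--     for name in names:
--         for key in vocabs_dict[name].keys():
--             index.setdefault(key, []).append(name)
--     # shared-key counts per ordered pair of names
--     counts = {}
--     for posting in index.values():
--         for a in posting:
--             for b in posting:
--                 counts[(a, b)] = counts.get((a, b), 0) + 1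
--     return {a + "_" + b: counts.get((a, b), 0) for a in names for b in names}
-- ===== Notes on version B (the rewrite author's own statement) =====
-- stated objective: faster
-- what changed: Instead of running vocab_compare's nested key-by-key scan for every ordered pair of vocabularies, B builds one inverted index key->names and derives all shared-key counts in a single pass over its postings, then emits the pre-ordered matrix from the count table.
import Mathlib
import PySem

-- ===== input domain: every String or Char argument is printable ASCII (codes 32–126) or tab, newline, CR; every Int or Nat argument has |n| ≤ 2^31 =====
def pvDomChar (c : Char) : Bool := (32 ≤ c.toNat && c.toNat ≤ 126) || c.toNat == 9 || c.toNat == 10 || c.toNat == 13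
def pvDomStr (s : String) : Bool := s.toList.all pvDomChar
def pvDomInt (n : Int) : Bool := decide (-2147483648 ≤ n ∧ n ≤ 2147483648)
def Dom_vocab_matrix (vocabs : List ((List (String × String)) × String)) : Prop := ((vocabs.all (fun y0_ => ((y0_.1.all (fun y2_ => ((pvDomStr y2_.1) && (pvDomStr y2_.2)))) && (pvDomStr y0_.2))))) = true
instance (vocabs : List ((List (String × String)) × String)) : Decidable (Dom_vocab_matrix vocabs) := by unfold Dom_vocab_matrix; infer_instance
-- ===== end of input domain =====

-- B replaces A's pairwise nested key scans (vocab_compare on every ordered pair) by one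
-- inverted index key -> names, from which all shared-key counts fall out in a single pass
-- over the postings (objective: faster).

-- ===== PORT A =====
-- each inner list of pairs is a Python dict: we read it through PySem.Dict.ofList
def vocab_compare (vocab1 vocab2 : PySem.Dict String String) : Int :=
  vocab1.keys.foldl (fun z tag1 =>
    vocab2.keys.foldl (fun z tag2 => if tag1 = tag2 then z + 1 else z) z) 0

def vocab_matrix (vocabs : List ((List (String × String)) × String)) : List (String × Int) :=
  let vocabsDict : PySem.Dict String (PySem.Dict String String) :=
    vocabs.foldl (fun d vocab => d.insert vocab.2 (PySem.Dict.ofList vocab.1)) PySem.Dict.empty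
  let matrix : PySem.Dict String Int :=
    vocabsDict.keys.foldl (fun m entry =>
      vocabsDict.keys.foldl (fun m other =>
        m.insert (entry ++ "_" ++ other)
          (vocab_compare (vocabsDict.getD entry PySem.Dict.empty)
                         (vocabsDict.getD other PySem.Dict.empty))) m)
      PySem.Dict.empty
  matrix.items

-- ===== PORT B =====
def vocab_matrix_alt (vocabs : List ((List (String × String)) × String)) : List (String × Int) :=
  let vocabsDict : PySem.Dict String (PySem.Dict String String) :=
    vocabs.foldl (fun d vocab => d.insert vocab.2 (PySem.Dict.ofList vocab.1)) PySem.Dict.empty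
  let names : List String := vocabsDict.keys
  -- inverted index: key -> list of vocab names containing it (setdefault(key, []).append(name))
  let index : PySem.Dict String (List String) :=
    names.foldl (fun idx name =>
      (vocabsDict.getD name PySem.Dict.empty).keys.foldl
        (fun idx key => idx.modify key [] (fun v => v ++ [name])) idx)
      PySem.Dict.empty
  -- shared-key counts per ordered pair of names
  let counts : PySem.Dict (String × String) Int :=
    index.values.foldl (fun c posting =>
      posting.foldl (fun c a =>
        posting.foldl (fun c b => c.modify (a, b) 0 (fun v => v + 1)) c) c)
      PySem.Dict.empty
  (names.foldl (fun m a =>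
    names.foldl (fun m b => m.insert (a ++ "_" ++ b) (counts.getD (a, b) 0)) m)
    PySem.Dict.empty).items

-- ===== PRECONDITION & SPEC =====
def Spec_vocab_matrix (vocabs : List ((List (String × String)) × String)) (out : List (String × Int)) : Prop := out = vocab_matrix_alt vocabs
instance (vocabs : List ((List (String × String)) × String)) (out : List (String × Int)) : Decidable (Spec_vocab_matrix vocabs out) := by unfold Spec_vocab_matrix; infer_instance

-- ===== CLAIM (what is proved, stated in full; the proofs are below) =====
def Claim_equal_vocab_matrix : Prop := ∀ (vocabs : List ((List (String × String)) × String)), Dom_vocab_matrix vocabs → Spec_vocab_matrix vocabs (vocab_matrix vocabs)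

-- ===== LEMMAS AND PROOFS =====

-- L3 compare lemma
theorem cmp_aux (kb : List String) (hb : kb.Nodup) :
    ∀ (ka : List String) (z : Int),
      ka.foldl (fun z t1 => kb.foldl (fun z t2 => if t1 = t2 then z + 1 else z) z) z
        = z + (ka.countP (fun t => decide (t ∈ kb)) : Int) := by
  intro ka
  induction ka with
  | nil => intro z; simp
  | cons t ka ih =>
    intro z
    have hinner : kb.foldl (fun z t2 => if t = t2 then z + 1 else z) z
        = z + (if t ∈ kb then 1 else 0 : Int) := by
      have h := PySem.List.foldl_count_if (fun t2 => decide (t = t2)) kb z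
      simp only [decide_eq_true_eq] at h
      rw [h]
      by_cases hm : t ∈ kb
      · have : kb.countP (fun t2 => decide (t = t2)) = kb.count t := by
          rw [List.count]
          congr 1
          funext x
          rw [Bool.eq_iff_iff]; simp only [decide_eq_true_eq, beq_iff_eq]; exact eq_comm
        rw [this, List.count_eq_one_of_mem hb hm]
        simp [hm]
      · have : kb.countP (fun t2 => decide (t = t2)) = 0 := by
          rw [List.countP_eq_zero]
          intro x hx; simp; rintro rfl; exact hm hx
        simp [this, hm]
    simp only [List.foldl_cons, hinner, List.countP_cons]
    rw [ih]
    by_cases hm : t ∈ kb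
    · simp [hm]; omega
    · simp [hm]

-- flatten the nested index-building loop
theorem index_eq_flat (names : List String) (key : String → List String) :
    names.foldl (fun idx n =>
        (key n).foldl (fun idx k => idx.modify k [] (fun v => v ++ [n])) idx)
      (PySem.Dict.empty : PySem.Dict String (List String))
    = (names.flatMap (fun n => (key n).map (fun k => (k, n)))).foldl
        (fun d p => d.modify p.1 [] (fun v => v ++ [p.2])) PySem.Dict.empty := by
  rw [List.foldl_flatMap]
  apply PySem.List.foldl_congr_mem
  intro acc n _
  rw [List.foldl_map]

theorem filter_flat (names : List String) (key : String → List String)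
    (hk : ∀ n, (key n).Nodup) (k : String) :
    ((names.flatMap (fun n => (key n).map (fun k => (k, n)))).filter
        (fun p => p.1 == k)).map (fun p => p.2)
      = names.filter (fun n => decide (k ∈ key n)) := by
  induction names with
  | nil => simp
  | cons n names ih =>
    simp only [List.flatMap_cons, List.filter_append, List.map_append, ih, List.filter_cons]
    have : (((key n).map (fun k' => (k', n))).filter (fun p => p.1 == k)).map
        (fun p => (p.2 : String)) = if (decide (k ∈ key n)) = true then [n] else [] := by
      rw [List.filter_map, List.map_map]
      have hflt : ((key n).filter ((fun p => p.1 == k) ∘ (fun k' => (k', n)))) = (key n).filter (fun k' => k' == k) := rfl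
      rw [hflt]
      by_cases hm : k ∈ key n
      · have h1 : (key n).filter (fun k' => k' == k) = [k] := by
          have := List.count_eq_one_of_mem (hk n) hm
          have hrep : (key n).filter (fun k' => k' == k) = List.replicate ((key n).count k) k := by
            rw [List.count]; exact List.filter_beq (l := key n) k
          rw [hrep, this]; rfl
        simp [h1, hm]
      · have h1 : (key n).filter (fun k' => k' == k) = [] := by
          rw [List.filter_eq_nil_iff]
          intro x hx; simp; rintro rfl; exact hm hx
        simp [h1, hm]
    rw [this]
    by_cases hm : k ∈ key n <;> simp [hm]

-- flatten the nested counts-building loop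
theorem counts_eq_flat (values : List (List String)) :
    values.foldl (fun c ps =>
        ps.foldl (fun c a => ps.foldl (fun c b => c.modify (a, b) 0 (fun v => v + 1)) c) c)
      (PySem.Dict.empty : PySem.Dict (String × String) Int)
    = (values.flatMap (fun ps => ps.flatMap (fun a => ps.map (fun b => (a, b))))).foldl
        (fun c p => c.modify p 0 (fun v => v + 1)) PySem.Dict.empty := by
  rw [List.foldl_flatMap]
  apply PySem.List.foldl_congr_mem
  intro acc ps _
  rw [List.foldl_flatMap]
  apply PySem.List.foldl_congr_mem
  intro acc2 a _
  rw [List.foldl_map]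

theorem sum_ite_const (ps : List String) (a : String) (c : Nat) :
    (ps.map (fun x => if x = a then c else 0)).sum = ps.count a * c := by
  induction ps with
  | nil => simp
  | cons x ps ih =>
    simp only [List.map_cons, List.sum_cons, ih, List.count_cons]
    by_cases h : x = a
    · subst h; simp [Nat.add_mul, Nat.add_comm]
    · simp [h]

theorem pair_count (ps : List String) (a b : String) :
    (ps.flatMap (fun x => ps.map (fun y => (x, y)))).count (a, b)
      = ps.count a * ps.count b := by
  rw [List.count, List.countP_flatMap]
  have : ∀ x : String, (List.countP (· == (a, b)) ∘ fun x => ps.map (fun y => (x, y))) x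
      = if x = a then ps.count b else 0 := by
    intro x
    simp only [Function.comp_apply, List.countP_map]
    by_cases h : x = a
    · subst h
      rw [if_pos rfl, List.count]
      apply List.countP_congr
      intro y _
      simp [Prod.ext_iff]
    · rw [if_neg h, List.countP_eq_zero]
      intro y _
      simp [Prod.ext_iff]
      intro h'; exact absurd h' h
  rw [List.map_congr_left (fun x _ => this x), sum_ite_const]

theorem sum_ite_one {α : Type} (l : List α) (p : α → Bool) :
    (l.map (fun x => if p x then 1 else 0)).sum = l.countP p := by
  induction l with
  | nil => simp
  | cons x l ih =>
    simp only [List.map_cons, List.sum_cons, ih, List.countP_cons]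
    by_cases h : p x <;> simp [h, Nat.add_comm]

theorem posting_spec (names : List String) (key : String → List String)
    (hk : ∀ n, (key n).Nodup) (k : String) :
    (names.foldl (fun idx n =>
        (key n).foldl (fun idx k => idx.modify k [] (fun v => v ++ [n])) idx)
      (PySem.Dict.empty : PySem.Dict String (List String))).getD k []
    = names.filter (fun n => decide (k ∈ key n)) := by
  rw [index_eq_flat, PySem.Dict.getD_foldl_modify_append, filter_flat names key hk k]
  simp [PySem.Dict.getD_empty]

theorem index_nodup_keys (names : List String) (key : String → List String) :
    (names.foldl (fun idx n =>
        (key n).foldl (fun idx k => idx.modify k [] (fun v => v ++ [n])) idx)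
      (PySem.Dict.empty : PySem.Dict String (List String))).keys.Nodup := by
  rw [index_eq_flat]
  exact PySem.Dict.nodup_keys_foldl_modify_key
    (names.flatMap (fun n => (key n).map (fun k => (k, n))))
    (fun p : String × String => p.1) [] (fun _ p v => v ++ [p.2]) PySem.Dict.empty
    (by simp [PySem.Dict.keys_empty])

theorem mem_index_keys (names : List String) (key : String → List String)
    (hk : ∀ n, (key n).Nodup) {k a : String} (ha : a ∈ names) (hka : k ∈ key a) :
    k ∈ (names.foldl (fun idx n =>
        (key n).foldl (fun idx k => idx.modify k [] (fun v => v ++ [n])) idx)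
      (PySem.Dict.empty : PySem.Dict String (List String))).keys := by
  set index := names.foldl (fun idx n =>
      (key n).foldl (fun idx k => idx.modify k [] (fun v => v ++ [n])) idx)
    (PySem.Dict.empty : PySem.Dict String (List String)) with hidx
  by_cases hc : index.contains k
  · exact (PySem.Dict.contains_iff_mem_keys index k).1 hc
  · exfalso
    have h0 : index.getD k [] = [] :=
      PySem.Dict.getD_of_not_contains index [] (by simpa using hc)
    rw [hidx, posting_spec names key hk k] at h0
    have : a ∈ names.filter (fun n => decide (k ∈ key n)) :=
      List.mem_filter.2 ⟨ha, by simpa using hka⟩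
    rw [h0] at this
    exact absurd this (List.not_mem_nil)

theorem index_count (names : List String) (key : String → List String)
    (hn : names.Nodup) (hk : ∀ n, (key n).Nodup) (a b : String)
    (ha : a ∈ names) (hb : b ∈ names) :
    (((names.foldl (fun idx n =>
          (key n).foldl (fun idx k => idx.modify k [] (fun v => v ++ [n])) idx)
        (PySem.Dict.empty : PySem.Dict String (List String))).values).foldl
      (fun c ps => ps.foldl (fun c a =>
          ps.foldl (fun c b => c.modify (a, b) 0 (fun v => v + 1)) c) c)
      (PySem.Dict.empty : PySem.Dict (String × String) Int)).getD (a, b) 0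
    = ((key a).countP (fun t => decide (t ∈ key b)) : Int) := by
  set index := names.foldl (fun idx n =>
      (key n).foldl (fun idx k => idx.modify k [] (fun v => v ++ [n])) idx)
    (PySem.Dict.empty : PySem.Dict String (List String)) with hidx
  rw [counts_eq_flat, PySem.Dict.getD_foldl_modify_add_one, PySem.Dict.getD_empty]
  -- count over the flattened pair list
  have hcount : (index.values.flatMap
        (fun ps => ps.flatMap (fun x => ps.map (fun y => (x, y))))).count (a, b)
      = (key a).countP (fun t => decide (t ∈ key b)) := by
    rw [List.count, List.countP_flatMap]
    have h1 : ∀ ps : List String,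
        (List.countP (· == (a, b)) ∘ fun ps => ps.flatMap (fun x => ps.map (fun y => (x, y)))) ps
        = ps.count a * ps.count b := by
      intro ps
      simpa [Function.comp, List.count] using pair_count ps a b
    rw [List.map_congr_left (fun ps _ => h1 ps)]
    -- values → keys
    rw [PySem.Dict.values_eq_map_keys index (index_nodup_keys names key) []]
    rw [List.map_map]
    have h2 : ∀ k ∈ index.keys,
        ((index.getD k []).count a * (index.getD k []).count b : Nat)
        = if (decide (k ∈ key a) && decide (k ∈ key b)) then 1 else 0 := by
      intro k _
      have hpost : index.getD k [] = names.filter (fun n => decide (k ∈ key n)) :=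
        posting_spec names key hk k
      have hcnt : ∀ x ∈ names, (index.getD k []).count x = if k ∈ key x then 1 else 0 := by
        intro x hx
        rw [hpost]
        by_cases hm : k ∈ key x
        · rw [if_pos hm]
          exact List.count_eq_one_of_mem (hn.filter _) (List.mem_filter.2 ⟨hx, by simpa using hm⟩)
        · rw [if_neg hm]
          rw [List.count_eq_zero]
          intro hmem
          exact hm (by simpa using (List.mem_filter.1 hmem).2)
      rw [hcnt a ha, hcnt b hb]
      by_cases h1 : k ∈ key a <;> by_cases h2 : k ∈ key b <;> simp [h1, h2]
    calc (index.keys.map ((fun ps => ps.count a * ps.count b) ∘ fun k => index.getD k [])).sum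
        = (index.keys.map (fun k => if (decide (k ∈ key a) && decide (k ∈ key b)) then 1 else 0)).sum := by
          apply congrArg
          exact List.map_congr_left (fun k hkm => h2 k hkm)
      _ = index.keys.countP (fun k => decide (k ∈ key a) && decide (k ∈ key b)) :=
          sum_ite_one _ _
      _ = (key a).countP (fun t => decide (t ∈ key b)) := by
          rw [List.countP_eq_length_filter, List.countP_eq_length_filter]
          have hperm : (index.keys.filter (fun k => decide (k ∈ key a) && decide (k ∈ key b))).Perm
              ((key a).filter (fun t => decide (t ∈ key b))) := by
            rw [List.perm_ext_iff_of_nodup ((index_nodup_keys names key).filter _) ((hk a).filter _)]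
            intro x
            simp only [List.mem_filter, Bool.and_eq_true, decide_eq_true_eq]
            constructor
            · rintro ⟨_, hxa, hxb⟩; exact ⟨hxa, by simpa using hxb⟩
            · rintro ⟨hxa, hxb⟩
              exact ⟨mem_index_keys names key hk ha hxa, hxa, by simpa using hxb⟩
          exact hperm.length_eq
  rw [hcount]
  simp

theorem build_nodup (vocabs : List ((List (String × String)) × String)) :
    (vocabs.foldl (fun d vocab => d.insert vocab.2 (PySem.Dict.ofList vocab.1))
      (PySem.Dict.empty : PySem.Dict String (PySem.Dict String String))).keys.Nodup :=
  PySem.Dict.nodup_keys_foldl_insert_key vocabs (fun v => v.2)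
    (fun _ v => PySem.Dict.ofList v.1) PySem.Dict.empty (by simp [PySem.Dict.keys_empty])

theorem build_values_nodup (vocabs : List ((List (String × String)) × String)) :
    ∀ n, ((vocabs.foldl (fun d vocab => d.insert vocab.2 (PySem.Dict.ofList vocab.1))
      (PySem.Dict.empty : PySem.Dict String (PySem.Dict String String))).getD
        n PySem.Dict.empty).keys.Nodup := by
  have : ∀ (d : PySem.Dict String (PySem.Dict String String)),
      (∀ n, (d.getD n PySem.Dict.empty).keys.Nodup) →
      ∀ n, ((vocabs.foldl (fun d vocab => d.insert vocab.2 (PySem.Dict.ofList vocab.1)) d).getD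
        n PySem.Dict.empty).keys.Nodup := by
    induction vocabs with
    | nil => intro d h; simpa using h
    | cons v vocabs ih =>
      intro d h
      simp only [List.foldl_cons]
      apply ih
      intro n
      rw [PySem.Dict.getD_insert]
      split
      · exact PySem.Dict.nodup_keys_ofList v.1
      · exact h n
  exact this PySem.Dict.empty (by intro n; simp [PySem.Dict.getD_empty, PySem.Dict.keys_empty])

theorem compare_eq_countP (v1 v2 : PySem.Dict String String) (h2 : v2.keys.Nodup) :
    vocab_compare v1 v2 = (v1.keys.countP (fun t => decide (t ∈ v2.keys)) : Int) := by
  unfold vocab_compare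
  simpa using cmp_aux v2.keys h2 v1.keys 0

theorem vm_main (vocabs : List ((List (String × String)) × String)) :
    vocab_matrix vocabs = vocab_matrix_alt vocabs := by
  unfold vocab_matrix vocab_matrix_alt
  set D := vocabs.foldl (fun d vocab => d.insert vocab.2 (PySem.Dict.ofList vocab.1))
    (PySem.Dict.empty : PySem.Dict String (PySem.Dict String String)) with hD
  apply congrArg PySem.Dict.items
  apply PySem.List.foldl_congr_mem
  intro m entry hent
  apply PySem.List.foldl_congr_mem
  intro m other hoth
  apply congrArg
  rw [compare_eq_countP _ _ (build_values_nodup vocabs other),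
    index_count D.keys (fun n => (D.getD n PySem.Dict.empty).keys)
      (build_nodup vocabs) (build_values_nodup vocabs) entry other hent hoth]

-- ===== VERDICT (by name: the statement is the Claim_ definition above) =====
theorem vocab_matrix_spec : Claim_equal_vocab_matrix := by
  intro vocabs _
  unfold Spec_vocab_matrix
  exact vm_main vocabs
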